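-- pv_equiv track=rewrite | github.com/in-yh/algorithm | 220920/4366_정식이의 은행업무/s1.py | candidate_2
-- ===== SOURCE A (Python) =====
-- def change_decimal(memory, n):
--     answer = 0
--     for i in range(len(memory)):
--         answer += int(memory[i])*(n**(len(memory)-1-i))
--     return answer
--
-- def candidate_2(memory):
--     decimal_2 = change_decimal(memory, 2) # 2진수를 10진수로 바꿔준 값, 10
--     candidate_2_list = []
--     for idx, k in enumerate(memory):
--         if k == '0':
--             value = decimal_2 + 2**(len(memory)-1-idx)
--         else:
--             value = decimal_2 - 2**(len(memory)-1-idx)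
--         candidate_2_list.append(value)
--     return candidate_2_list
-- ===== SOURCE B (Python) =====
-- def candidate_2(memory):
--     # Suffix composition: maintain, right-to-left, the candidate list of the
--     # suffix seen so far together with its value and 2**len(suffix); each new
--     # head digit lifts every suffix candidate by the head's positional value
--     # and prepends the candidate obtained by flipping the head itself.
--     cands, value, p = [], 0, 1
--     for d in reversed(memory):
--         head = int(d) * p
--         nv = head + value
--         flipped = nv + p if d == '0' else nv - p
--         cands = [flipped] + [head + c for c in cands]
--         value, p = nv, 2 * p
--     return cands
-- ===== Notes on version B (the rewrite author's own statement) =====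
-- stated objective: alternative
-- what changed: Replaces A's two-stage plan (convert the whole string once, then emit base +/- 2**(n-1-idx) per index) with a right-to-left suffix composition that never forms base +/- power: it carries the suffix's candidate list, value and power, lifting every suffix candidate by the new head digit's positional value and prepending the flipped-head candidate.
import Mathlib
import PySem

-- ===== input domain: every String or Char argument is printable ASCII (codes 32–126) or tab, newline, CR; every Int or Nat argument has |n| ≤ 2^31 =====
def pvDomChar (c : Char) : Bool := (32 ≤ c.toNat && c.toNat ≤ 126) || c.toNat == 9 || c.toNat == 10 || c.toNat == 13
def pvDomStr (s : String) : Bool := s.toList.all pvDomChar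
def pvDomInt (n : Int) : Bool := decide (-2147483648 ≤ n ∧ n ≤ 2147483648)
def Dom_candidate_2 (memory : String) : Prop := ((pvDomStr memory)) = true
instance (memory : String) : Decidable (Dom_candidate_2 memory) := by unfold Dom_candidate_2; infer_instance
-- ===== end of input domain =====

-- B replaces A's two-stage plan (convert the whole string once, then emit base ± 2^(n-1-idx)
-- per index) by a right-to-left suffix composition of candidate lists (objective: alternative,
-- structurally different at similar cost).


-- ===== PORT A =====
-- int(c) for a single decimal-digit character: exact on '0'..'9' (Pre_ admits only those;
-- Python's int() raises ValueError on any other single character).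
def pyIntOfDigit (c : Char) : Int := (c.toNat : Int) - 48

def change_decimal (memory : List Char) (n : Int) : Int :=
  (List.range memory.length).foldl
    (fun answer i => answer + pyIntOfDigit (memory.getD i ' ') * n ^ (memory.length - 1 - i)) 0

def candidate_2 (memory : String) : List Int :=
  let m := memory.toList
  let decimal_2 := change_decimal m 2
  m.zipIdx.foldl
    (fun acc p =>
      acc ++ [if p.1 = '0' then decimal_2 + 2 ^ (m.length - 1 - p.2)
              else decimal_2 - 2 ^ (m.length - 1 - p.2)]) []

-- ===== PORT B =====
-- the loop body of Source B: state = (suffix candidate list, suffix value, 2^len(suffix))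
def pvStep (d : Char) (st : List Int × Int × Int) : List Int × Int × Int :=
  let head := pyIntOfDigit d * st.2.2
  let nv := head + st.2.1
  let flipped := if d = '0' then nv + st.2.2 else nv - st.2.2
  (flipped :: st.1.map (fun c => head + c), nv, 2 * st.2.2)

def candidate_2_alt (memory : String) : List Int :=
  (memory.toList.reverse.foldl (fun st d => pvStep d st) ([], 0, 1)).1

-- ===== PRECONDITION & SPEC =====
-- Pre_ admits exactly the strings of decimal digits: on any other character Python's
-- int(memory[i]) raises ValueError, so A returns on no other input.
def Pre_candidate_2 (memory : String) : Prop :=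
  memory.toList.all (fun c => decide ('0' ≤ c) && decide (c ≤ '9')) = true
instance (memory : String) : Decidable (Pre_candidate_2 memory) := by unfold Pre_candidate_2; infer_instance
def pvWitness_candidate_2 : String := "10"

def Spec_candidate_2 (memory : String) (out : List Int) : Prop := out = candidate_2_alt memory
instance (memory : String) (out : List Int) : Decidable (Spec_candidate_2 memory out) := by unfold Spec_candidate_2; infer_instance

-- ===== CLAIM (what is proved, stated in full; the proofs are below) =====
def Claim_equal_candidate_2 : Prop := ∀ (memory : String), Dom_candidate_2 memory → Pre_candidate_2 memory → Spec_candidate_2 memory (candidate_2 memory)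

-- ===== LEMMAS AND PROOFS =====

-- the list A produces, as a map over indices
def pvAlist (m : List Char) : List Int :=
  (List.range m.length).map (fun i =>
    if m.getD i ' ' = '0' then change_decimal m 2 + 2 ^ (m.length - 1 - i)
    else change_decimal m 2 - 2 ^ (m.length - 1 - i))

theorem pv_foldl_scale (l : List Nat) (g : Nat → Int) (a : Int) :
    l.foldl (fun a i => a + 2 * g i) (2 * a) = 2 * l.foldl (fun a i => a + g i) a := by
  induction l generalizing a with
  | nil => rfl
  | cons x t ih => simpa [List.foldl_cons, mul_add] using ih (a + g x)

theorem pv_cd_append (m : List Char) (c : Char) :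
    change_decimal (m ++ [c]) 2 = 2 * change_decimal m 2 + pyIntOfDigit c := by
  unfold change_decimal
  have hlen : (m ++ [c]).length = m.length + 1 := by simp
  rw [hlen, List.range_succ, List.foldl_append]
  have hcongr :
      (List.range m.length).foldl
        (fun answer i => answer + pyIntOfDigit ((m ++ [c]).getD i ' ') * 2 ^ (m.length + 1 - 1 - i)) (0 : Int)
      = (List.range m.length).foldl
        (fun answer i => answer + 2 * (pyIntOfDigit (m.getD i ' ') * 2 ^ (m.length - 1 - i))) (0 : Int) := by
    apply PySem.List.foldl_congr_mem
    intro b i hi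
    have hi' : i < m.length := List.mem_range.mp hi
    have hget : (m ++ [c]).getD i ' ' = m.getD i ' ' := by
      simp [List.getD, List.getElem?_append_left hi']
    have hexp : m.length + 1 - 1 - i = (m.length - 1 - i) + 1 := by omega
    rw [hget, hexp, pow_succ]
    ring
  rw [hcongr]
  have hscale := pv_foldl_scale (List.range m.length)
      (fun i => pyIntOfDigit (m.getD i ' ') * 2 ^ (m.length - 1 - i)) 0
  simp only [mul_zero] at hscale
  rw [hscale]
  have hgetc : (m ++ [c]).getD m.length ' ' = c := by
    simp [List.getD]
  simp only [List.foldl_cons, List.foldl_nil]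
  rw [hgetc]
  have hexp0 : m.length + 1 - 1 - m.length = 0 := by omega
  rw [hexp0, pow_zero, mul_one]

theorem pv_cd_eq_horner (m : List Char) :
    change_decimal m 2 = m.foldl (fun b c => b * 2 + pyIntOfDigit c) 0 := by
  induction m using List.reverseRecOn with
  | nil => rfl
  | append_singleton t c ih =>
    rw [pv_cd_append, List.foldl_append, ih]
    simp [mul_comm]

theorem pv_horner_init (t : List Char) (a : Int) :
    t.foldl (fun b c => b * 2 + pyIntOfDigit c) a
      = a * 2 ^ t.length + t.foldl (fun b c => b * 2 + pyIntOfDigit c) 0 := by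
  induction t generalizing a with
  | nil => simp
  | cons c t ih =>
    simp only [List.foldl_cons, List.length_cons]
    rw [ih (a * 2 + pyIntOfDigit c), ih (0 * 2 + pyIntOfDigit c)]
    ring

theorem pv_cd_cons (d : Char) (t : List Char) :
    change_decimal (d :: t) 2 = pyIntOfDigit d * 2 ^ t.length + change_decimal t 2 := by
  rw [pv_cd_eq_horner, pv_cd_eq_horner, List.foldl_cons, pv_horner_init]
  ring_nf

-- B's foldr invariant: the state after consuming m is (A's list for m, value of m, 2^|m|)
theorem pv_inv (m : List Char) :
    m.foldr (fun d st => pvStep d st) ([], 0, 1)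
      = (pvAlist m, change_decimal m 2, 2 ^ m.length) := by
  induction m with
  | nil =>
    simp [pvAlist, change_decimal]
  | cons d t ih =>
    rw [List.foldr_cons, ih]
    simp only [pvStep, Prod.mk.injEq]
    refine ⟨?_, ?_, ?_⟩
    · -- list component
      simp only [pvAlist, pv_cd_cons, List.length_cons, List.range_succ_eq_map,
        List.map_cons, List.map_map, List.cons.injEq]
      constructor
      · have e : t.length + 1 - 1 - 0 = t.length := by omega
        simp only [List.getD_cons_zero, e]
      · apply List.map_congr_left
        intro i hi
        simp only [Function.comp_apply, List.getD_cons_succ, Nat.succ_eq_add_one]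
        have e : t.length + 1 - 1 - (i + 1) = t.length - 1 - i := by omega
        rw [e]
        split_ifs <;> ring
    · rw [pv_cd_cons]
    · rw [List.length_cons, pow_succ]; ring

theorem pv_A_eq_Alist (memory : String) : candidate_2 memory = pvAlist memory.toList := by
  unfold candidate_2
  rw [PySem.List.foldl_append_singleton_eq_map]
  simp only [List.nil_append]
  apply List.ext_getElem
  · simp [pvAlist]
  · intro i h1 h2
    simp only [pvAlist, List.getElem_map, List.getElem_zipIdx, List.getElem_range]
    have hi : i < memory.toList.length := by simpa using h1
    rw [List.getD_eq_getElem _ _ (by simpa [List.length_range] using hi)]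
    simp

-- ===== VERDICT (by name: the statement is the Claim_ definition above) =====
theorem candidate_2_spec : Claim_equal_candidate_2 := by
  intro memory _ _
  unfold Spec_candidate_2 candidate_2_alt
  rw [List.foldl_reverse, pv_inv, pv_A_eq_Alist]
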